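-- pv_equiv track=rewrite | github.com/Rot-08/Small-Projects | Sort-Algorithm.py | charSort
-- ===== SOURCE A (Python) =====
-- def charSort(word1, word2):
--     if (len(word1) <= len(word2)):
--         for i in range(len(word1)):
--             if word1[i].lower() == word2[i].lower():
--                 continue
--             elif (word1[i].lower() > word2[i].lower()):
--                 return [word2, word1]
--             else:
--                 return [word1, word2]
--     else:
--         return charSort(word2, word1)
-- ===== SOURCE B (Python) =====
-- def charSort(word1, word2):
--     m = min(len(word1), len(word2))
--     a = word1[:m].lower()
--     b = word2[:m].lower()
--     if a == b:
--         return None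
--     return [word1, word2] if a < b else [word2, word1]
-- ===== Notes on version B (the rewrite author's own statement) =====
-- stated objective: faster
-- what changed: Replaces A's length-test-plus-self-recursion and per-index character loop with a loop-free staged computation: truncate both words to the common length, lowercase the two slices once, then decide with one equality test and one whole-string lexicographic comparison.
import Mathlib
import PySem

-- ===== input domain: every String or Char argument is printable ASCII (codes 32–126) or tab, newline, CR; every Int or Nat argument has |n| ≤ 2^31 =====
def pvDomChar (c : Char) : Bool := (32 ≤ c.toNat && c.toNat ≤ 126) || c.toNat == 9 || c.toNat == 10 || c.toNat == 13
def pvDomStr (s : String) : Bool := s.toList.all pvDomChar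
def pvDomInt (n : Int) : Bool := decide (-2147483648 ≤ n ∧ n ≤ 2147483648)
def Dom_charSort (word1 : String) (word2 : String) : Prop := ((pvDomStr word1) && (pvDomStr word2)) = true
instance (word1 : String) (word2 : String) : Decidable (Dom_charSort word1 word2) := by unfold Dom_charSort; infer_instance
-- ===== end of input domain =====

-- B drops the per-character loop and the self-recursive swap entirely: it truncates both words to
-- the common length, lowercases the two whole slices once, and decides with one equality test and
-- one whole-string comparison (objective: simpler); return value only, neither program mutates.

-- ===== PORT A =====
-- A's for-loop over i in range(len(word1)), comparing word1[i].lower() with word2[i].lower();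
-- in the branch it runs in, len(word1) ≤ len(word2), so indexing walks the two char lists in step.
def charSortLoopA (l1 l2 : List Char) (word1 word2 : String) : Option (List String) :=
  match l1, l2 with
  | [], _ => none
  | _ :: _, [] => none   -- unreachable when l1.length ≤ l2.length
  | c :: cs, d :: ds =>
    if PySem.Chars.lowerChar c = PySem.Chars.lowerChar d then
      charSortLoopA cs ds word1 word2
    else if PySem.Chars.lowerChar d < PySem.Chars.lowerChar c then
      some [word2, word1]
    else
      some [word1, word2]

def charSort (word1 : String) (word2 : String) : Option (List String) :=
  if word1.toList.length ≤ word2.toList.length then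
    charSortLoopA word1.toList word2.toList word1 word2
  else
    charSort word2 word1
termination_by word1.toList.length
decreasing_by omega

-- ===== PORT B =====
-- Python's `<` on strings: lexicographic comparison of the code-point sequences (exact; no
-- PySem primitive covers string `<`, so it is ported by hand, step for step over the chars).
def pyStrLt : List Char → List Char → Bool
  | [], [] => false
  | [], _ :: _ => true
  | _ :: _, [] => false
  | c :: cs, d :: ds =>
    if c < d then true
    else if d < c then false
    else pyStrLt cs ds

-- Source B: m = min of the lengths; a = word1[:m].lower(); b = word2[:m].lower();
-- word[:m] is `take m`, str.lower is PySem.Chars.lower on the char list.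
def charSort_alt (word1 : String) (word2 : String) : Option (List String) :=
  let m : Nat := min word1.toList.length word2.toList.length
  let a := PySem.Chars.lower (word1.toList.take m)
  let b := PySem.Chars.lower (word2.toList.take m)
  if a = b then none
  else if pyStrLt a b then some [word1, word2]
  else some [word2, word1]

-- ===== PRECONDITION & SPEC =====
def Spec_charSort (word1 : String) (word2 : String) (out : Option (List String)) : Prop := out = charSort_alt word1 word2
instance (word1 : String) (word2 : String) (out : Option (List String)) : Decidable (Spec_charSort word1 word2 out) := by unfold Spec_charSort; infer_instance

-- ===== CLAIM (what is proved, stated in full; the proofs are below) =====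
def Claim_equal_charSort : Prop := ∀ (word1 : String) (word2 : String), Dom_charSort word1 word2 → Spec_charSort word1 word2 (charSort word1 word2)

-- ===== LEMMAS AND PROOFS =====

-- A's loop, when the first list is no longer than the second, computes exactly B's
-- compare-the-lowered-truncations decision.
theorem pyStrLt_cons_same (x : Char) (a b : List Char) :
    pyStrLt (x :: a) (x :: b) = pyStrLt a b := by
  simp [pyStrLt]

theorem loopA_spec (l1 l2 : List Char) (w1 w2 : String) (h : l1.length ≤ l2.length) :
    charSortLoopA l1 l2 w1 w2 =
      (if PySem.Chars.lower l1 = PySem.Chars.lower (l2.take l1.length) then none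
       else if pyStrLt (PySem.Chars.lower l1) (PySem.Chars.lower (l2.take l1.length)) then
         some [w1, w2]
       else some [w2, w1]) := by
  induction l1 generalizing l2 with
  | nil => simp [charSortLoopA, PySem.Chars.lower]
  | cons c cs ih =>
    cases l2 with
    | nil => simp at h
    | cons d ds =>
      simp only [charSortLoopA, List.length_cons, List.take_succ_cons, PySem.Chars.lower,
        List.map_cons]
      rcases lt_trichotomy (PySem.Chars.lowerChar c) (PySem.Chars.lowerChar d) with hlt | heq | hgt
      · rw [if_neg (ne_of_lt hlt), if_neg (not_lt_of_gt hlt),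
          if_neg (by simp only [List.cons.injEq, not_and]; exact fun hh => absurd hh (ne_of_lt hlt))]
        simp [pyStrLt, hlt]
      · rw [if_pos heq, ih ds (by simpa using h)]
        simp only [heq, List.cons.injEq, true_and, pyStrLt_cons_same, PySem.Chars.lower]
        rfl
      · rw [if_neg (ne_of_gt hgt), if_pos hgt,
          if_neg (by simp only [List.cons.injEq, not_and]; exact fun hh => absurd hh (ne_of_gt hgt)),
          if_neg (by simp [pyStrLt, hgt, not_lt_of_gt hgt])]

-- On equal-length, unequal lists `pyStrLt` is antisymmetric.
theorem pyStrLt_antisymm (a b : List Char) (hl : a.length = b.length) (hne : a ≠ b) :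
    pyStrLt b a = !pyStrLt a b := by
  induction a generalizing b with
  | nil => cases b <;> simp_all
  | cons c cs ih =>
    cases b with
    | nil => simp at hl
    | cons d ds =>
      rcases lt_trichotomy c d with hlt | heq | hgt
      · simp [pyStrLt, hlt, not_lt_of_gt hlt]
      · subst heq
        simp only [pyStrLt, if_neg (lt_irrefl c)]
        exact ih ds (by simpa using hl) (by simpa using hne)
      · simp [pyStrLt, hgt, not_lt_of_gt hgt]

theorem lower_length (l : List Char) : (PySem.Chars.lower l).length = l.length := by
  simp [PySem.Chars.lower]

theorem charSort_eq_alt (word1 word2 : String) : charSort word1 word2 = charSort_alt word1 word2 := by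
  rw [charSort]
  by_cases h : word1.toList.length ≤ word2.toList.length
  · rw [if_pos h, charSort_alt]
    simp only [min_eq_left h, List.take_length]
    exact loopA_spec _ _ _ _ h
  · rw [if_neg h, charSort, if_pos (le_of_lt (lt_of_not_ge h))]
    rw [loopA_spec _ _ _ _ (le_of_lt (lt_of_not_ge h))]
    rw [charSort_alt]
    simp only [min_eq_right (le_of_lt (lt_of_not_ge h)), List.take_length]
    set a := PySem.Chars.lower (word1.toList.take word2.toList.length) with ha
    set b := PySem.Chars.lower word2.toList with hb
    by_cases he : a = b
    · simp [he]
    · rw [if_neg he, if_neg (Ne.symm he)]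
      have hlen : a.length = b.length := by
        rw [ha, hb, lower_length, lower_length, List.length_take]
        omega
      rw [pyStrLt_antisymm a b hlen he]
      cases hx : pyStrLt a b <;> simp

-- ===== VERDICT (by name: the statement is the Claim_ definition above) =====
theorem charSort_spec : Claim_equal_charSort := by
  intro w1 w2 _
  unfold Spec_charSort
  exact charSort_eq_alt w1 w2
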